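-- pv_equiv track=rewrite | github.com/mik888em/actions-playwright-google | scripts/demo_playwright.py | filter_banned
-- ===== SOURCE A (Python) =====
-- BANNED_SUBSTRINGS = ("binance.com", "x.com", "youtube.com")
--
-- def filter_banned(items: list) -> list:
--     out = []
--     for it in items:
--         source = (it.get("source") or "").lower()
--         orig = (it.get("original_url") or "").lower()
--         bad = any(b in source for b in BANNED_SUBSTRINGS) or any(b in orig for b in BANNED_SUBSTRINGS)
--         if not bad:
--             out.append(it)
--     return out
-- ===== SOURCE B (Python) =====
-- BANNED_SUBSTRINGS = ("binance.com", "x.com", "youtube.com")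
--
-- def _has_banned(text):
--     # single left-to-right scan: at each position check whether any banned
--     # substring starts there, instead of one full substring search per pattern
--     for i in range(len(text)):
--         for b in BANNED_SUBSTRINGS:
--             if text.startswith(b, i):
--                 return True
--     return False
--
-- def filter_banned(items: list) -> list:
--     return [it for it in items
--             if not (_has_banned((it.get("source") or "").lower())
--                     or _has_banned((it.get("original_url") or "").lower()))]
-- ===== Notes on version B (the rewrite author's own statement) =====
-- stated objective: alternative
-- what changed: Replaces the per-pattern 'b in field' substring searches with a single left-to-right position scan that tests every banned prefix at each index, and replaces the accumulator loop with a filtering comprehension.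
import Mathlib
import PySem

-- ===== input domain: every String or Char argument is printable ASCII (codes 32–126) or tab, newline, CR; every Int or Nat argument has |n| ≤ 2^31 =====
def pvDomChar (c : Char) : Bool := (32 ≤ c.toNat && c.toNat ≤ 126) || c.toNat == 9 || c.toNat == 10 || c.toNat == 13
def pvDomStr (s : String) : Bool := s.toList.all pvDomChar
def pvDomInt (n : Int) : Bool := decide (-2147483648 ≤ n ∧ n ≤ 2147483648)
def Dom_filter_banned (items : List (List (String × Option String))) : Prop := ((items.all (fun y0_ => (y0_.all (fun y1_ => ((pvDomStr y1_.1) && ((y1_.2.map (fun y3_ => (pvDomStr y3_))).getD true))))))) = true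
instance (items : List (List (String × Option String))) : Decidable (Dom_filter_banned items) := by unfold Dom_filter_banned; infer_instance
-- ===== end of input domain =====

-- ===== PORT A =====
-- B replaces the per-pattern substring searches with one position scan and the
-- accumulator loop with a filter; alternative formulation, same cost.

def pvBanned : List String := ["binance.com", "x.com", "youtube.com"]

-- (it.get(k) or "") : missing key or None (or "") gives ""
def pvGetField (it : List (String × Option String)) (k : String) : String :=
  match (PySem.Dict.mk it).get? k with
  | some (some s) => s
  | _ => ""

def filter_banned (items : List (List (String × Option String))) : List (List (String × Option String)) :=
  items.foldl (fun out it =>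
    let source := PySem.Str.lower (pvGetField it "source")
    let orig := PySem.Str.lower (pvGetField it "original_url")
    let bad := pvBanned.any (fun b => PySem.Str.isIn b source) || pvBanned.any (fun b => PySem.Str.isIn b orig)
    if !bad then out ++ [it] else out) []

-- ===== PORT B =====
-- one scan over positions; at each position try every banned prefix
def pvHasBanned : List Char → Bool
  | [] => false
  | c :: rest => pvBanned.any (fun b => PySem.Chars.startswith (c :: rest) b.toList) || pvHasBanned rest

def filter_banned_alt (items : List (List (String × Option String))) : List (List (String × Option String)) :=
  items.filter (fun it =>
    !(pvHasBanned (PySem.Str.lower (pvGetField it "source")).toList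
      || pvHasBanned (PySem.Str.lower (pvGetField it "original_url")).toList))

-- ===== PRECONDITION & SPEC =====
def Spec_filter_banned (items : List (List (String × Option String))) (out : List (List (String × Option String))) : Prop := out = filter_banned_alt items
instance (items : List (List (String × Option String))) (out : List (List (String × Option String))) : Decidable (Spec_filter_banned items out) := by unfold Spec_filter_banned; infer_instance

-- ===== CLAIM (what is proved, stated in full; the proofs are below) =====
def Claim_equal_filter_banned : Prop := ∀ (items : List (List (String × Option String))), Dom_filter_banned items → Spec_filter_banned items (filter_banned items)

-- ===== LEMMAS AND PROOFS =====


lemma pvHasBanned_iff (cs : List Char) :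
    pvHasBanned cs = true ↔ ∃ b ∈ pvBanned, ∃ j, b.toList <+: cs.drop j := by
  induction cs with
  | nil =>
    simp only [pvHasBanned, Bool.false_eq_true, false_iff]
    rintro ⟨b, hb, j, hp⟩
    simp only [List.drop_nil] at hp
    have : b.toList = [] := List.prefix_nil.mp hp
    simp only [pvBanned, List.mem_cons] at hb
    rcases hb with rfl | rfl | rfl | h <;> simp_all
  | cons c rest ih =>
    simp only [pvHasBanned, Bool.or_eq_true, List.any_eq_true, ih,
      PySem.Chars.startswith_iff]
    constructor
    · rintro (⟨b, hb, hp⟩ | ⟨b, hb, j, hp⟩)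
      · exact ⟨b, hb, 0, hp⟩
      · exact ⟨b, hb, j + 1, hp⟩
    · rintro ⟨b, hb, j, hp⟩
      cases j with
      | zero => exact Or.inl ⟨b, hb, hp⟩
      | succ k => exact Or.inr ⟨b, hb, k, hp⟩

lemma pvHasBanned_eq_any (cs : List Char) :
    pvHasBanned cs = pvBanned.any (fun b => PySem.Chars.isIn b.toList cs) := by
  rcases h : pvBanned.any (fun b => PySem.Chars.isIn b.toList cs) with _ | _
  · rw [Bool.eq_false_iff]
    intro hc
    rcases (pvHasBanned_iff cs).mp hc with ⟨b, hb, j, hp⟩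
    have hin : PySem.Chars.isIn b.toList cs = true :=
      (PySem.Chars.exists_prefix_drop_iff_isIn b.toList cs).mp ⟨j, hp⟩
    have : pvBanned.any (fun b => PySem.Chars.isIn b.toList cs) = true :=
      List.any_eq_true.mpr ⟨b, hb, hin⟩
    rw [h] at this
    exact Bool.false_ne_true this
  · rcases List.any_eq_true.mp h with ⟨b, hb, hin⟩
    rcases (PySem.Chars.exists_prefix_drop_iff_isIn b.toList cs).mpr hin with ⟨j, hp⟩
    exact (pvHasBanned_iff cs).mpr ⟨b, hb, j, hp⟩

-- ===== VERDICT (by name: the statement is the Claim_ definition above) =====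
theorem filter_banned_spec : Claim_equal_filter_banned := by
  intro items _
  unfold Spec_filter_banned filter_banned filter_banned_alt
  rw [PySem.List.foldl_append_if_eq_filter]
  simp only [List.nil_append]
  congr 1
  funext it
  simp [pvHasBanned_eq_any]
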